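-- pv_equiv track=rewrite | github.com/Wenchao-Yang/feel-the-news | src/NB_basicProcess.py | addSpace
-- ===== SOURCE A (Python) =====
-- def addSpace(text):
--     # loop text, add space after period if there is not
--     text_list = text.split()
--     text_list_len = len(text_list)
--     for i in range(text_list_len):
--         if '.' in text_list[i]:
--             text_list[i] = text_list[i].replace('.', '. ')
--     text = ' '.join(text_list)
--     return text
-- ===== SOURCE B (Python) =====
-- def addSpace(text):
--     # Single left-to-right character scan with a small state machine:
--     # no token list is built; whitespace runs collapse to one pending
--     # separator, and each '.' emits a following space as it is copied.
--     out = []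
--     pending = False   # a separator space is owed before the next word char
--     started = False   # some word character has already been emitted
--     for ch in text:
--         if ch.isspace():
--             pending = started
--         else:
--             if pending:
--                 out.append(' ')
--                 pending = False
--             out.append(ch)
--             if ch == '.':
--                 out.append(' ')
--             started = True
--     return ''.join(out)
-- ===== Notes on version B (the rewrite author's own statement) =====
-- stated objective: alternative
-- what changed: Replaces A's split-into-token-list / indexed loop with per-token replace / join pipeline by a single left-to-right character scan with a three-field state machine (output buffer, pending-separator flag, started flag) that never materializes a token list.
import Mathlib
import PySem

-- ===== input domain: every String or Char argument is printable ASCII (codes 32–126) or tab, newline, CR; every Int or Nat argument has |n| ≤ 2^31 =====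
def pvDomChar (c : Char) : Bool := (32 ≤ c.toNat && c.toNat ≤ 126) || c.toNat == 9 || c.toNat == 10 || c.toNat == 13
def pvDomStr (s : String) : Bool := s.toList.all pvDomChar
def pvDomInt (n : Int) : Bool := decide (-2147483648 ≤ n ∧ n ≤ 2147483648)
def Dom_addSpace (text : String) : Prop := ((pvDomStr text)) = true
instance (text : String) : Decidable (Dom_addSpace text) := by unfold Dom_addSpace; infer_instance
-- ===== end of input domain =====

-- B replaces A's split / per-token loop / join pipeline by a single character scan with a
-- small state machine (output buffer, pending-separator flag, started flag); objective: alternative.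

-- ===== PORT A =====
def addSpace (text : String) : String :=
  let textList := PySem.Str.split₀ text
  let textListLen := textList.length
  let textList :=
    (PySem.List.pyRange 0 (textListLen : Int) 1).foldl
      (fun acc i =>
        if PySem.Str.isIn "." (PySem.List.pyGetD acc i "") then
          acc.set i.toNat (PySem.Str.replace (PySem.List.pyGetD acc i "") "." ". ")
        else acc)
      textList
  PySem.Str.join " " textList

-- ===== PORT B =====
-- one loop step of Source B's state machine: state = (out, pending, started)
def pvStep (st : List Char × Bool × Bool) (ch : Char) : List Char × Bool × Bool :=
  match st with
  | (out, pending, started) =>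
    if PySem.Chars.isspace ch then (out, started, started)
    else
      let out1 := if pending then out ++ [' '] else out
      let out2 := out1 ++ [ch]
      let out3 := if ch = '.' then out2 ++ [' '] else out2
      (out3, false, true)

def addSpace_alt (text : String) : String :=
  let st := text.toList.foldl pvStep ([], false, false)
  String.ofList st.1   -- ''.join(out) with out a list of single characters

-- ===== PRECONDITION & SPEC =====
def Spec_addSpace (text : String) (out : String) : Prop := out = addSpace_alt text
instance (text : String) (out : String) : Decidable (Spec_addSpace text out) := by unfold Spec_addSpace; infer_instance

-- ===== CLAIM (what is proved, stated in full; the proofs are below) =====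
def Claim_equal_addSpace : Prop := ∀ (text : String), Dom_addSpace text → Spec_addSpace text (addSpace text)

-- ===== LEMMAS AND PROOFS =====

/-- The per-character expansion realised by `replace · "." ". "`. -/
def pvDotExpand (c : Char) : List Char := if c = '.' then ['.', ' '] else [c]

/-- Dot-expansion of a whole word. -/
def pvE (w : List Char) : List Char := w.flatMap pvDotExpand

/-- `A`'s per-token transform. -/
def pvTokF (t : String) : String :=
  if PySem.Str.isIn "." t then PySem.Str.replace t "." ". " else t

lemma pvReplaceGo_eq (l acc : List Char) (fuel : Nat) (h : l.length ≤ fuel) :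
    PySem.Chars.replace.go ['.'] ['.', ' '] fuel l acc = acc.reverse ++ l.flatMap pvDotExpand := by
  induction l generalizing fuel acc with
  | nil =>
      cases fuel <;> rw [PySem.Chars.replace.go] <;> simp
  | cons c t ih =>
      cases fuel with
      | zero => simp at h
      | succ fuel =>
          have ht : t.length ≤ fuel := by simpa using h
          rw [PySem.Chars.replace.go]
          by_cases hc : c = '.'
          · subst hc
            rw [if_pos (by simp [List.isPrefixOf])]
            simp only [List.length_singleton, List.drop_succ_cons, List.drop_zero]
            rw [ih _ _ ht]
            simp [pvDotExpand]
          · rw [if_neg (by simp [List.isPrefixOf]; exact fun h' => hc h'.symm)]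
            rw [ih _ _ ht]
            simp [pvDotExpand, hc]

lemma pvReplaceDot (l : List Char) :
    PySem.Chars.replace l ['.'] ['.', ' '] = l.flatMap pvDotExpand := by
  rw [PySem.Chars.replace]
  simp only [List.isEmpty_cons]
  exact pvReplaceGo_eq l [] l.length le_rfl

lemma pvFlatMap_no_dot (l : List Char) (h : '.' ∉ l) : l.flatMap pvDotExpand = l := by
  induction l with
  | nil => rfl
  | cons c t ih =>
      simp only [List.mem_cons, not_or] at h
      simp [pvDotExpand, Ne.symm h.1, ih h.2]

lemma pvTokF_toList (t : String) :
    (pvTokF t).toList = t.toList.flatMap pvDotExpand := by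
  unfold pvTokF
  by_cases h : PySem.Str.isIn "." t = true
  · rw [if_pos h, PySem.Str.toList_replace]
    exact pvReplaceDot t.toList
  · rw [if_neg h]
    have h' : PySem.Chars.isIn ['.'] t.toList = false := by
      have := eq_false_of_ne_true h
      rwa [PySem.Str.isIn_eq] at this
    have hdot : '.' ∉ t.toList := by
      intro hm
      have : PySem.Chars.isIn ['.'] t.toList = true :=
        (PySem.Chars.isIn_iff_infix _ _).mpr ((List.singleton_infix_iff _ _).mpr hm)
      simp [h'] at this
    exact (pvFlatMap_no_dot t.toList hdot).symm

/-- A's index-loop over the token list is the map of `pvTokF`. -/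
lemma pvLoop_eq_map (suf pre : List String) :
    (List.range' pre.length suf.length 1).foldl
      (fun acc k =>
        if PySem.Str.isIn "." (acc.getD k "") then
          acc.set k (PySem.Str.replace (acc.getD k "") "." ". ")
        else acc)
      (pre ++ suf) = pre ++ suf.map pvTokF := by
  induction suf generalizing pre with
  | nil => simp
  | cons c t ih =>
      simp only [List.length_cons]
      rw [List.range'_succ, List.foldl_cons]
      have hget : (pre ++ c :: t).getD pre.length "" = c := by
        simp [List.getD_eq_getElem?_getD]
      have hstep : (if PySem.Str.isIn "." ((pre ++ c :: t).getD pre.length "") then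
            (pre ++ c :: t).set pre.length
              (PySem.Str.replace ((pre ++ c :: t).getD pre.length "") "." ". ")
          else pre ++ c :: t) = (pre ++ [pvTokF c]) ++ t := by
        rw [hget]
        unfold pvTokF
        by_cases h : PySem.Str.isIn "." c = true
        · rw [if_pos h, if_pos h, List.set_append_right _ _ le_rfl]
          simp
        · rw [if_neg h, if_neg h]
          simp
      rw [hstep]
      have h1 : pre.length + 1 = (pre ++ [pvTokF c]).length := by simp
      rw [h1, ih (pre ++ [pvTokF c])]
      simp

lemma pvAddSpace_eq_map (text : String) :
    addSpace text = PySem.Str.join " " ((PySem.Str.split₀ text).map pvTokF) := by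
  rw [show addSpace text =
      PySem.Str.join " "
        ((PySem.List.pyRange 0 ((PySem.Str.split₀ text).length : Int) 1).foldl
          (fun acc i =>
            if PySem.Str.isIn "." (PySem.List.pyGetD acc i "") then
              acc.set i.toNat (PySem.Str.replace (PySem.List.pyGetD acc i "") "." ". ")
            else acc)
          (PySem.Str.split₀ text)) from rfl]
  congr 1
  set parts := PySem.Str.split₀ text with hparts
  rw [PySem.List.pyRange_zero_natCast, List.foldl_map]
  have hbody : (fun (acc : List String) (k : Nat) =>
      if PySem.Str.isIn "." (PySem.List.pyGetD acc ((k : Nat) : Int) "") then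
        acc.set ((k : Nat) : Int).toNat
          (PySem.Str.replace (PySem.List.pyGetD acc ((k : Nat) : Int) "") "." ". ")
      else acc)
      = (fun (acc : List String) (k : Nat) =>
          if PySem.Str.isIn "." (acc.getD k "") then
            acc.set k (PySem.Str.replace (acc.getD k "") "." ". ")
          else acc) := by
    funext acc k
    rw [PySem.List.pyGetD_natCast]
    simp
  rw [hbody, List.range_eq_range']
  simpa using pvLoop_eq_map parts []

/-- Join-with-space of one more expanded word at the end. -/
lemma pvJ_append (ws : List (List Char)) (w : List Char) :
    PySem.Chars.join [' '] ((ws ++ [w]).map pvE)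
      = PySem.Chars.join [' '] (ws.map pvE) ++ (if ws.isEmpty then [] else [' ']) ++ pvE w := by
  induction ws with
  | nil => simp [PySem.Chars.join_singleton, PySem.Chars.join_nil]
  | cons a rest ih =>
      cases rest with
      | nil =>
          simp only [List.map_cons, List.map_nil, List.singleton_append, List.isEmpty_cons]
          rw [PySem.Chars.join_cons_cons, PySem.Chars.join_singleton, PySem.Chars.join_singleton]
          simp
      | cons b rest' =>
          simp only [List.cons_append, List.map_cons, List.map_append, List.map_nil,
            List.isEmpty_cons] at ih ⊢
          rw [PySem.Chars.join_cons_cons, PySem.Chars.join_cons_cons, ih]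
          simp [List.append_assoc]

/-- The machine state reached while `split₀.go` still has `cur`/`acc` to process. -/
def pvStJ (cur : List Char) (acc : List (List Char)) : List Char × Bool × Bool :=
  if cur.isEmpty then
    if acc.isEmpty then ([], false, false)
    else (PySem.Chars.join [' '] (acc.reverse.map pvE), true, true)
  else (PySem.Chars.join [' '] (acc.reverse.map pvE)
          ++ (if acc.isEmpty then [] else [' ']) ++ pvE cur.reverse, false, true)

lemma pvStep_nonspace (st : List Char × Bool × Bool) (c : Char)
    (h : PySem.Chars.isspace c = false) :
    pvStep st c = ((if st.2.1 then st.1 ++ [' '] else st.1) ++ pvDotExpand c, false, true) := by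
  obtain ⟨out, pending, started⟩ := st
  simp only [pvStep, h, Bool.false_eq_true, if_false, pvDotExpand]
  by_cases hc : c = '.' <;> simp [hc]

/-- Invariant: running Source B's machine from the state corresponding to `(cur, acc)` computes
the dot-expanded join of the words `split₀.go` produces. -/
lemma pvMachine (rest : List Char) : ∀ (cur : List Char) (acc : List (List Char)),
    (rest.foldl pvStep (pvStJ cur acc)).1
      = PySem.Chars.join [' '] ((PySem.Chars.split₀.go rest cur acc).map pvE) := by
  induction rest with
  | nil =>
      intro cur acc
      rw [PySem.Chars.split₀.go]
      cases cur with
      | nil =>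
          simp only [List.foldl_nil, pvStJ, List.isEmpty_nil, if_true, List.isEmpty_iff]
          by_cases ha : acc = [] <;> simp [ha, PySem.Chars.join_nil]
      | cons c cs =>
          simp only [List.foldl_nil, pvStJ, List.isEmpty_cons, Bool.false_eq_true, if_false]
          rw [show (((c :: cs).reverse :: acc)).reverse = acc.reverse ++ [(c :: cs).reverse] by simp]
          rw [pvJ_append]
          simp [List.isEmpty_iff]
  | cons c r ih =>
      intro cur acc
      rw [PySem.Chars.split₀.go, List.foldl_cons]
      by_cases hsp : PySem.Chars.isspace c = true
      · rw [if_pos hsp]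
        have hstep : pvStep (pvStJ cur acc) c
            = (if cur.isEmpty then pvStJ [] acc else pvStJ [] (cur.reverse :: acc)) := by
          cases cur with
          | nil =>
              simp only [pvStJ, List.isEmpty_nil, if_true]
              by_cases ha : acc.isEmpty <;> simp [pvStep, hsp, ha]
          | cons a as =>
              simp only [pvStJ, List.isEmpty_cons, pvStep, hsp, if_true, List.isEmpty_nil]
              rw [show ((a :: as).reverse :: acc).reverse = acc.reverse ++ [(a :: as).reverse] by simp]
              rw [pvJ_append]
              simp [List.isEmpty_iff]
        rw [hstep]
        cases cur with
        | nil => simp only [List.isEmpty_nil, if_true]; exact ih [] acc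
        | cons a as => simp only [List.isEmpty_cons]; exact ih [] ((a :: as).reverse :: acc)
      · have hsp' : PySem.Chars.isspace c = false := eq_false_of_ne_true hsp
        rw [if_neg hsp]
        have hstep : pvStep (pvStJ cur acc) c = pvStJ (c :: cur) acc := by
          rw [pvStep_nonspace _ _ hsp']
          cases cur with
          | nil =>
              by_cases ha : acc.isEmpty
              · rw [List.isEmpty_iff] at ha
                simp [pvStJ, ha, pvE, PySem.Chars.join_nil]
              · simp [pvStJ, ha, pvE, List.append_assoc]
          | cons a as =>
              simp only [pvStJ, List.isEmpty_cons]
              have : pvE ((c :: (a :: as)).reverse) = pvE ((a :: as).reverse) ++ pvDotExpand c := by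
                simp [pvE]
              rw [this]
              simp [List.append_assoc]
        rw [hstep]
        exact ih (c :: cur) acc

-- ===== VERDICT (by name: the statement is the Claim_ definition above) =====
theorem addSpace_spec : Claim_equal_addSpace := by
  intro text _
  unfold Spec_addSpace
  apply String.toList_inj.mp
  -- A's side: join of per-token dot expansions
  rw [pvAddSpace_eq_map, PySem.Str.toList_join]
  have hA : ((PySem.Str.split₀ text).map pvTokF).map String.toList
      = ((PySem.Str.split₀ text).map String.toList).map pvE := by
    simp only [List.map_map]
    apply List.map_congr_left
    intro t _
    exact pvTokF_toList t
  rw [show (" " : String).toList = [' '] from rfl, hA, PySem.Str.split₀_map_toList]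
  -- B's side: the state machine, started from the initial state
  have hB : (addSpace_alt text).toList
      = (text.toList.foldl pvStep ([], false, false)).1 := by
    simp [addSpace_alt]
  rw [hB, show (([], false, false) : List Char × Bool × Bool) = pvStJ [] [] from rfl,
    pvMachine text.toList [] []]
  rfl
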